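-- pv_equiv track=rewrite | github.com/ActiveInferenceInstitute/GeneralizedNotationNotation | src/mcp/mcp.py | _match_uri_template
-- ===== SOURCE A (Python) =====
-- def _match_uri_template(template: str, uri: str) -> bool:
--     """Check if URI matches template pattern."""
--     # Simple template matching - can be enhanced with regex
--     if template == uri:
--         return True
--
--     # Handle simple {param} patterns
--     if "{" in template and "}" in template:
--         # This is a simplified implementation
--         # In a real implementation, you'd want more sophisticated pattern matching
--         template_parts = template.split("/")
--         uri_parts = uri.split("/")
--
--         if len(template_parts) != len(uri_parts):
--             return False
--
--         for template_part, uri_part in zip(template_parts, uri_parts):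
--             if template_part.startswith("{") and template_part.endswith("}"):
--                 continue  # Parameter placeholder
--             if template_part != uri_part:
--                 return False
--
--         return True
--
--     return False
-- ===== SOURCE B (Python) =====
-- def _match_uri_template(template: str, uri: str) -> bool:
--     """Check if URI matches template pattern (single segment-by-segment scan
--     via str.partition; no part lists, no length pre-check, no equality fast path)."""
--     t, u = template, uri
--     while True:
--         tseg, tsep, trest = t.partition("/")
--         useg, usep, urest = u.partition("/")
--         if not (tseg.startswith("{") and tseg.endswith("}")) and tseg != useg:
--             return False
--         if not tsep or not usep:
--             return not tsep and not usep
--         t, u = trest, urest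
-- ===== Notes on version B (the rewrite author's own statement) =====
-- stated objective: simpler
-- what changed: A's template==uri fast path plus split-into-lists, length check and zip loop are replaced by a single recursive segment-by-segment scan using str.partition, which never builds the part lists and enforces the segment count by running out of both strings together.
import Mathlib
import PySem

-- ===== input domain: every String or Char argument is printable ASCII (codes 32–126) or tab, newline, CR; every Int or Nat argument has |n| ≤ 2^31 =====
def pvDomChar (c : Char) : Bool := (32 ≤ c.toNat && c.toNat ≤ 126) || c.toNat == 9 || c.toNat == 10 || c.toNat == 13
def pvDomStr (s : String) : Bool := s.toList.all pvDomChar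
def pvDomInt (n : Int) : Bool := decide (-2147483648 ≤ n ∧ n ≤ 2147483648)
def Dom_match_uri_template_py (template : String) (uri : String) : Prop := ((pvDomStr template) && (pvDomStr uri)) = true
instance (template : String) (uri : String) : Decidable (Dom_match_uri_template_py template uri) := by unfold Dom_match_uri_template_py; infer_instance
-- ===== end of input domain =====

-- B replaces A's fast path + split-into-lists + zip loop by a single recursive
-- segment-by-segment scan (objective: simpler; both return identical values everywhere).

-- termination helper cited by the recursive ports/helpers
theorem pvDropWhileConsLen {p : Char → Bool} {l rest : List Char} {c : Char}
    (h : l.dropWhile p = c :: rest) : rest.length < l.length := by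
  have h1 := List.length_dropWhile_le p l
  rw [h] at h1; simp at h1; omega

-- ===== PORT A =====
def match_uri_template_py (template : String) (uri : String) : Bool :=
  if template == uri then true
  else if PySem.Str.isIn "{" template && PySem.Str.isIn "}" template then
    -- template.split("/") / uri.split("/"); PySem's split, taken on the char-list side
    let template_parts := PySem.Chars.splitOn template.toList ['/']
    let uri_parts := PySem.Chars.splitOn uri.toList ['/']
    if !(template_parts.length == uri_parts.length) then false
    else
      -- the for-loop with early 'return False' is the conjunction over the zipped parts
      (template_parts.zip uri_parts).all (fun p =>
        if PySem.Chars.startswith p.1 ['{'] && PySem.Chars.endswith p.1 ['}'] then true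
        else p.1 == p.2)
  else false

-- ===== PORT B =====
-- str.partition("/") ported by hand (exact for the one-char separator):
-- the head segment is takeWhile (≠ '/'), the separator is present iff dropWhile is nonempty.
def pvMatchChars (t u : List Char) : Bool :=
  let tseg := t.takeWhile (· != '/')
  let useg := u.takeWhile (· != '/')
  if !(PySem.Chars.startswith tseg ['{'] && PySem.Chars.endswith tseg ['}']) && tseg != useg then
    false
  else
    match ht : t.dropWhile (· != '/'), u.dropWhile (· != '/') with
    | _ :: trest, _ :: urest => pvMatchChars trest urest
    | [], [] => true
    | _, _ => false
termination_by t.length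
decreasing_by exact pvDropWhileConsLen ht

def match_uri_template_py_alt (template : String) (uri : String) : Bool :=
  pvMatchChars template.toList uri.toList

-- ===== PRECONDITION & SPEC =====
def Spec_match_uri_template_py (template : String) (uri : String) (out : Bool) : Prop := out = match_uri_template_py_alt template uri
instance (template : String) (uri : String) (out : Bool) : Decidable (Spec_match_uri_template_py template uri out) := by unfold Spec_match_uri_template_py; infer_instance

-- ===== CLAIM (what is proved, stated in full; the proofs are below) =====
def Claim_equal_match_uri_template_py : Prop := ∀ (template : String) (uri : String), Dom_match_uri_template_py template uri → Spec_match_uri_template_py template uri (match_uri_template_py template uri)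

-- ===== LEMMAS AND PROOFS =====

-- the segment list that '/'-split produces, in the recursive shape B consumes it
def pvSegs (t : List Char) : List (List Char) :=
  t.takeWhile (· != '/') ::
    (match ht : t.dropWhile (· != '/') with
     | [] => []
     | _ :: rest => pvSegs rest)
termination_by t.length
decreasing_by exact pvDropWhileConsLen ht

def pvSegok (a b : List Char) : Bool :=
  (PySem.Chars.startswith a ['{'] && PySem.Chars.endswith a ['}']) || a == b

theorem pvSegs_nil {t : List Char} (h : t.dropWhile (· != '/') = []) :
    pvSegs t = [t.takeWhile (· != '/')] := by
  rw [pvSegs]; split <;> simp_all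

theorem pvSegs_cons {t rest : List Char} {c : Char} (h : t.dropWhile (· != '/') = c :: rest) :
    pvSegs t = t.takeWhile (· != '/') :: pvSegs rest := by
  rw [pvSegs]; split <;> simp_all

theorem pvSegs_ne_nil (t : List Char) : pvSegs t ≠ [] := by rw [pvSegs]; simp

theorem pvSplitOn_go_spec (fuel : Nat) : ∀ (l cur : List Char), ∀ (accs : List (List Char)),
    l.length < fuel →
    PySem.Chars.splitOn.go ['/'] fuel l cur accs =
      accs.reverse ++ (cur.reverse ++ (pvSegs l).headI) :: (pvSegs l).tail := by
  induction fuel with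
  | zero => intro l cur accs h; omega
  | succ fuel ih =>
    intro l cur accs h
    match l with
    | [] =>
      rw [PySem.Chars.splitOn.go]
      case _ => rw [pvSegs]; simp
      all_goals simp
    | c :: rest =>
      rw [PySem.Chars.splitOn.go]
      by_cases hc : c = '/'
      · subst hc
        have hpre : List.isPrefixOf ['/'] ('/' :: rest) = true := by simp [List.isPrefixOf]
        rw [if_pos hpre]
        simp only [List.length_singleton, List.drop_succ_cons, List.drop_zero]
        rw [ih rest [] (cur.reverse :: accs) (by simp at h; omega)]
        rw [pvSegs_cons (t := '/' :: rest) (c := '/') (rest := rest) (by simp)]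
        rcases h2 : pvSegs rest with _ | ⟨s, ss⟩
        · exact absurd h2 (pvSegs_ne_nil rest)
        · simp
      · have hpre : List.isPrefixOf ['/'] (c :: rest) = false := by
          simp [List.isPrefixOf]; exact fun hh => hc hh.symm
        rw [if_neg (by simp [hpre])]
        rw [ih rest (c :: cur) accs (by simp at h; omega)]
        rcases hdw : rest.dropWhile (· != '/') with _ | ⟨d, ds⟩
        · rw [pvSegs_nil (t := c :: rest) (by simp [hc, hdw]), pvSegs_nil hdw]
          simp [hc]
        · rw [pvSegs_cons (t := c :: rest) (c := d) (rest := ds) (by simp [hc, hdw]), pvSegs_cons hdw]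
          simp [hc]

theorem pvSplitOn_eq_segs (l : List Char) : PySem.Chars.splitOn l ['/'] = pvSegs l := by
  rw [PySem.Chars.splitOn, pvSplitOn_go_spec (l.length + 1) l [] [] (by omega)]
  rcases h2 : pvSegs l with _ | ⟨s, ss⟩
  · exact absurd h2 (pvSegs_ne_nil l)
  · simp

theorem pvMatch_eq_segs (n : Nat) : ∀ t u : List Char, t.length ≤ n →
    pvMatchChars t u =
      ((pvSegs t).length == (pvSegs u).length &&
        ((pvSegs t).zip (pvSegs u)).all (fun p => pvSegok p.1 p.2)) := by
  induction n with
  | zero =>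
    intro t u hn
    have ht0 : t = [] := by cases t <;> simp_all
    subst ht0
    rw [pvMatchChars]
    have hdt : List.dropWhile (· != '/') ([] : List Char) = [] := rfl
    rcases hdu : u.dropWhile (· != '/') with _ | ⟨d, ur⟩
    · rw [pvSegs_nil hdt, pvSegs_nil hdu]
      have ha : (PySem.Chars.startswith (List.takeWhile (· != '/') ([] : List Char)) ['{'] &&
          PySem.Chars.endswith (List.takeWhile (· != '/') ([] : List Char)) ['}']) = false := by decide
      by_cases he : List.takeWhile (· != '/') ([] : List Char) = u.takeWhile (· != '/')
      · rw [if_neg (by simp [he])]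
        split <;> simp_all [pvSegok]
      · rw [if_pos (by rw [ha]; simp only [Bool.not_false, Bool.true_and, bne_iff_ne, ne_eq]
                       exact he)]
        have hs : pvSegok (List.takeWhile (· != '/') ([] : List Char))
            (u.takeWhile (· != '/')) = false := by
          rw [pvSegok, ha]
          simp only [Bool.false_or, beq_eq_false_iff_ne, ne_eq]
          exact he
        simp [List.takeWhile_nil ▸ hs]
    · rw [pvSegs_nil hdt, pvSegs_cons hdu]
      have hlen : pvSegs ur ≠ [] := pvSegs_ne_nil ur
      split
      · simp [List.length_eq_zero_iff, hlen]
      · split <;> simp_all [List.length_eq_zero_iff]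
  | succ n ih =>
    intro t u hn
    rw [pvMatchChars]
    rcases hdt : t.dropWhile (· != '/') with _ | ⟨c, tr⟩ <;>
      rcases hdu : u.dropWhile (· != '/') with _ | ⟨d, ur⟩
    · rw [pvSegs_nil hdt, pvSegs_nil hdu]
      by_cases ha : (PySem.Chars.startswith (t.takeWhile (· != '/')) ['{'] &&
          PySem.Chars.endswith (t.takeWhile (· != '/')) ['}']) = true
      · rw [if_neg (by simp [ha])]
        split <;> simp_all [pvSegok]
      · simp only [Bool.not_eq_true] at ha
        by_cases he : t.takeWhile (· != '/') = u.takeWhile (· != '/')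
        · rw [if_neg (by simp [he])]
          split <;> simp_all [pvSegok]
        · rw [if_pos (by simp [ha, he])]
          simp [pvSegok, ha, he]
    · -- t ends, u has more segments: both sides false
      rw [pvSegs_nil hdt, pvSegs_cons hdu]
      have hlen : pvSegs ur ≠ [] := pvSegs_ne_nil ur
      split
      · simp [List.length_eq_zero_iff, hlen]
      · split <;> simp_all [List.length_eq_zero_iff]
    · rw [pvSegs_cons hdt, pvSegs_nil hdu]
      have hlen : pvSegs tr ≠ [] := pvSegs_ne_nil tr
      split
      · simp [List.length_eq_zero_iff, hlen]
      · split <;> simp_all [List.length_eq_zero_iff]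
    · -- both have a further segment: recurse
      rw [pvSegs_cons hdt, pvSegs_cons hdu]
      have hrec : pvMatchChars tr ur =
          ((pvSegs tr).length == (pvSegs ur).length &&
            ((pvSegs tr).zip (pvSegs ur)).all (fun p => pvSegok p.1 p.2)) := by
        have := pvDropWhileConsLen hdt
        exact ih tr ur (by omega)
      by_cases ha : (PySem.Chars.startswith (t.takeWhile (· != '/')) ['{'] &&
          PySem.Chars.endswith (t.takeWhile (· != '/')) ['}']) = true
      · rw [if_neg (by simp [ha])]
        split <;> simp_all [pvSegok]
      · simp only [Bool.not_eq_true] at ha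
        by_cases he : t.takeWhile (· != '/') = u.takeWhile (· != '/')
        · rw [if_neg (by simp [he])]
          split <;> simp_all [pvSegok]
        · rw [if_pos (by simp [ha, he])]
          simp [pvSegok, ha, he]

theorem pvDropWhileHead {p : Char → Bool} {l rest : List Char} {d : Char}
    (h : l.dropWhile p = d :: rest) : p d = false := by
  have h2 := List.head_dropWhile_not p (l := l) (by simp [h])
  simp only [h, List.head_cons] at h2
  simpa using h2

-- every character of a segment is a character of the split string
theorem pvSegs_mem_chars (n : Nat) : ∀ l : List Char, l.length ≤ n →
    ∀ seg ∈ pvSegs l, ∀ c ∈ seg, c ∈ l := by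
  induction n with
  | zero =>
    intro l hn seg hseg c hc
    have hl0 : l = [] := by cases l <;> simp_all
    subst hl0
    rw [pvSegs_nil (t := []) rfl] at hseg
    simp at hseg; subst hseg; simp_all
  | succ n ih =>
    intro l hn seg hseg c hc
    rcases hd : l.dropWhile (· != '/') with _ | ⟨d, rest⟩
    · rw [pvSegs_nil hd] at hseg
      simp at hseg; subst hseg
      exact (List.takeWhile_sublist _).mem hc
    · rw [pvSegs_cons hd] at hseg
      rcases List.mem_cons.mp hseg with h1 | h1
      · subst h1
        exact (List.takeWhile_sublist _).mem hc
      · have hlen := pvDropWhileConsLen hd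
        have : c ∈ rest := ih rest (by omega) seg h1 c hc
        have : c ∈ l.dropWhile (· != '/') := by rw [hd]; simp [this]
        exact (List.dropWhile_sublist _).mem this

-- a segment list reassembles to the original string, hence pvSegs is injective
def pvUnseg : List (List Char) → List Char
  | [] => []
  | [s] => s
  | s :: ss => s ++ '/' :: pvUnseg ss

theorem pvUnseg_segs (n : Nat) : ∀ l : List Char, l.length ≤ n → pvUnseg (pvSegs l) = l := by
  induction n with
  | zero =>
    intro l hn
    have hl0 : l = [] := by cases l <;> simp_all
    subst hl0
    rw [pvSegs_nil (t := []) rfl]; rfl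
  | succ n ih =>
    intro l hn
    rcases hd : l.dropWhile (· != '/') with _ | ⟨d, rest⟩
    · rw [pvSegs_nil hd, pvUnseg]
      have := List.takeWhile_append_dropWhile (p := (· != '/')) (l := l)
      rw [hd] at this; simpa using this
    · have hds : d = '/' := by have := pvDropWhileHead hd; simpa using this
      subst hds
      rw [pvSegs_cons hd]
      have hlen := pvDropWhileConsLen hd
      rcases hps : pvSegs rest with _ | ⟨s, ss⟩
      · exact absurd hps (pvSegs_ne_nil rest)
      · rw [pvUnseg]
        case _ =>
          rw [← hps, ih rest (by omega)]
          have := List.takeWhile_append_dropWhile (p := (· != '/')) (l := l)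
          rw [hd] at this; exact this
        all_goals simp

theorem pvSegs_inj {a b : List Char} (h : pvSegs a = pvSegs b) : a = b := by
  have ha := pvUnseg_segs a.length a le_rfl
  have hb := pvUnseg_segs b.length b le_rfl
  rw [← ha, ← hb, h]

theorem pvZipAllEq : ∀ xs ys : List (List Char), xs.length = ys.length →
    ((xs.zip ys).all fun p => p.1 == p.2) = true → xs = ys := by
  intro xs
  induction xs with
  | nil => intro ys h _; cases ys <;> simp_all
  | cons x xt ih =>
    intro ys h hall
    cases ys with
    | nil => simp_all
    | cons y yt =>
      simp only [List.zip_cons_cons, List.all_cons, Bool.and_eq_true, beq_iff_eq] at hall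
      have := ih yt (by simpa using h) hall.2
      simp [hall.1, this]

theorem pvZipSelfAll (f : List Char × List Char → Bool) : ∀ xs : List (List Char),
    ((xs.zip xs).all f) = xs.all fun x => f (x, x) := by
  intro xs
  induction xs with
  | nil => rfl
  | cons x xt ih => simp [ih]

-- template without '{' (or without '}') has no placeholder segment
theorem pvNoPlaceholder {l : List Char} (h : ('{' ∉ l) ∨ ('}' ∉ l)) :
    ∀ seg ∈ pvSegs l,
      (PySem.Chars.startswith seg ['{'] && PySem.Chars.endswith seg ['}']) = false := by
  intro seg hseg
  by_cases hsw : PySem.Chars.startswith seg ['{'] = true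
  · by_cases hew : PySem.Chars.endswith seg ['}'] = true
    · exfalso
      have hmem := pvSegs_mem_chars l.length l le_rfl seg hseg
      rcases h with h | h
      · exact h (hmem _ (List.IsPrefix.mem (List.mem_singleton_self _)
          ((PySem.Chars.startswith_iff _ _).mp hsw)))
      · exact h (hmem _ (List.IsSuffix.mem (List.mem_singleton_self _)
          ((PySem.Chars.endswith_iff _ _).mp hew)))
    · simp [hew]
  · simp [hsw]

theorem match_uri_template_py_spec : Claim_equal_match_uri_template_py := by
  intro template uri _
  unfold Spec_match_uri_template_py match_uri_template_py match_uri_template_py_alt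
  rw [pvMatch_eq_segs template.toList.length template.toList uri.toList le_rfl]
  by_cases heq : template = uri
  · subst heq
    rw [if_pos (by simp)]
    rw [pvZipSelfAll]
    simp [pvSegok]
  · rw [if_neg (by simp [heq])]
    by_cases hbr : (PySem.Str.isIn "{" template && PySem.Str.isIn "}" template) = true
    · rw [if_pos hbr, pvSplitOn_eq_segs, pvSplitOn_eq_segs]
      by_cases hl : (pvSegs template.toList).length = (pvSegs uri.toList).length
      · rw [if_neg (by simp [hl])]
        simp only [hl, beq_self_eq_true, Bool.true_and]
        simp only [pvSegok]
        congr 1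
        funext p
        by_cases hc : (PySem.Chars.startswith p.1 ['{'] && PySem.Chars.endswith p.1 ['}']) = true <;>
          simp [hc]
      · rw [if_pos (by simp [hl])]
        simp [hl]
    · rw [if_neg hbr]
      cases hR : ((pvSegs template.toList).length == (pvSegs uri.toList).length &&
          ((pvSegs template.toList).zip (pvSegs uri.toList)).all fun p => pvSegok p.1 p.2) with
      | false => rfl
      | true =>
        exfalso
        simp only [Bool.and_eq_true, beq_iff_eq, List.all_eq_true] at hR
        obtain ⟨hlen, hall⟩ := hR
        have hnob : ('{' ∉ template.toList) ∨ ('}' ∉ template.toList) := by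
          simp only [Bool.and_eq_true, not_and_or, Bool.not_eq_true] at hbr
          rcases hbr with h | h
          · left
            intro hmem
            have : PySem.Str.isIn "{" template = true := by
              rw [PySem.Str.isIn_iff_infix]
              exact (List.singleton_infix_iff '{' template.toList).mpr hmem
            simp_all
          · right
            intro hmem
            have : PySem.Str.isIn "}" template = true := by
              rw [PySem.Str.isIn_iff_infix]
              exact (List.singleton_infix_iff '}' template.toList).mpr hmem
            simp_all
        have hsegeq : pvSegs template.toList = pvSegs uri.toList := by
          apply pvZipAllEq _ _ hlen
          simp only [List.all_eq_true]
          intro p hp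
          have h1 : p.1 ∈ pvSegs template.toList := (List.of_mem_zip hp).1
          have := hall p hp
          rw [pvSegok, pvNoPlaceholder hnob p.1 h1] at this
          simpa using this
        exact heq (by ext1; exact pvSegs_inj hsegeq)
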